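-- pv_equiv track=rewrite | github.com/sacrosanct24/poe-price-checker | core/stash_valuator.py | _get_item_links
-- ===== SOURCE A (Python) =====
-- from typing import Any, Callable, Dict, List, Optional
--
-- def _get_item_links(item: Dict[str, Any]) -> int:
--     """Get number of links for an item."""
--     sockets = item.get("sockets", [])
--     if not sockets:
--         return 0
--
--     # Count max linked group
--     groups: Dict[int, int] = {}
--     for s in sockets:
--         group = s.get("group", 0)
--         groups[group] = groups.get(group, 0) + 1
--
--     return max(groups.values()) if groups else 0
-- ===== SOURCE B (Python) =====
-- from typing import Any, Dict
--
--
-- def _get_item_links(item: Dict[str, Any]) -> int: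
--     """Get number of links for an item (sort group keys, scan maximal run)."""
--     sockets = item.get("sockets", [])
--     if not sockets:
--         return 0
--
--     keys = sorted(s.get("group", 0) for s in sockets)
--     best = 0
--     cur = 0
--     prev = None
--     for k in keys:
--         if prev is not None and k == prev:
--             cur = cur + 1
--         else:
--             cur = 1
--             prev = k
--         best = max(best, cur)
--     return best
-- ===== Notes on version B (the rewrite author's own statement) =====
-- stated objective: alternative
-- what changed: Replaces the hash-based group frequency table and max over dict values by sorting the group keys and one linear run-length scan keeping the longest run of equal consecutive keys.
import Mathlib
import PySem

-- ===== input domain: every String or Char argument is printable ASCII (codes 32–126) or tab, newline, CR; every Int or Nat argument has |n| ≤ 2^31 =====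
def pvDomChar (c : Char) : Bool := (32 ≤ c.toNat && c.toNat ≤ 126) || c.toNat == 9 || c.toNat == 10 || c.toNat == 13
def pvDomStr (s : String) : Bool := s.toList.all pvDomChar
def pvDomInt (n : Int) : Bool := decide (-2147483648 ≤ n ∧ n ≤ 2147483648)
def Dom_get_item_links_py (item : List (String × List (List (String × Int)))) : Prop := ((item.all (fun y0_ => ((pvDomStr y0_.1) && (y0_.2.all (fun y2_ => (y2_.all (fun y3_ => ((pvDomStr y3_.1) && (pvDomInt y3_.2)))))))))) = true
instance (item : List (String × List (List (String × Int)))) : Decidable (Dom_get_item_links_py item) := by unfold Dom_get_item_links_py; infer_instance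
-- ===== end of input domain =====

-- B replaces A's hash-based frequency count by sort-then-longest-run; same return value, no speed claim.

-- ===== PORT A =====
def get_item_links_py (item : List (String × List (List (String × Int)))) : Int :=
  let sockets := (PySem.Dict.mk item).getD "sockets" []
  if sockets = [] then 0
  else
    let groups := sockets.foldl (fun d s =>
      let group := (PySem.Dict.mk s).getD "group" 0
      d.insert group (d.getD group 0 + 1)) (PySem.Dict.empty : PySem.Dict Int Int)
    match PySem.List.max? groups.values (fun v => v) with
    | some m => m
    | none => 0

-- ===== PORT B =====
-- one loop step of Source B: (best, cur, prev) updated by the next sorted key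
def bstep (st : Int × Int × Option Int) (k : Int) : Int × Int × Option Int :=
  let cur := if st.2.2 = some k then st.2.1 + 1 else 1
  (max st.1 cur, cur, some k)

def get_item_links_py_alt (item : List (String × List (List (String × Int)))) : Int :=
  let sockets := (PySem.Dict.mk item).getD "sockets" []
  if sockets = [] then 0
  else
    let keys := PySem.List.sorted (sockets.map (fun s => (PySem.Dict.mk s).getD "group" 0)) (fun x => x) false
    (keys.foldl bstep ((0 : Int), (0 : Int), (none : Option Int))).1

-- ===== PRECONDITION & SPEC =====
def Spec_get_item_links_py (item : List (String × List (List (String × Int)))) (out : Int) : Prop := out = get_item_links_py_alt item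
instance (item : List (String × List (List (String × Int)))) (out : Int) : Decidable (Spec_get_item_links_py item out) := by unfold Spec_get_item_links_py; infer_instance

-- ===== CLAIM (what is proved, stated in full; the proofs are below) =====
def Claim_equal_get_item_links_py : Prop := ∀ (item : List (String × List (List (String × Int)))), Dom_get_item_links_py item → Spec_get_item_links_py item (get_item_links_py item)

-- ===== LEMMAS AND PROOFS =====

-- running max of b and f k over k ∈ m
def pvF (m : List Int) (b : Int) (f : Int → Int) : Int := m.foldl (fun a k => max a (f k)) b

theorem pvF_map (m : List Int) (b : Int) (f : Int → Int) : pvF m b f = (m.map f).foldl max b := by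
  simp [pvF, List.foldl_map]

theorem pvF_le (m : List Int) (b c : Int) (f : Int → Int)
    (h : ∀ x ∈ m, f x ≤ c) (hb : b ≤ c) : pvF m b f ≤ c := by
  induction m generalizing b with
  | nil => simpa [pvF] using hb
  | cons x t ih =>
    have := ih (max b (f x)) (fun y hy => h y (by simp [hy]))
      (by have := h x (by simp); omega)
    simpa [pvF, List.foldl] using this

theorem pvF_ub (m : List Int) (b : Int) (f : Int → Int) :
    b ≤ pvF m b f ∧ ∀ x ∈ m, f x ≤ pvF m b f := by
  rw [pvF_map]
  have h := PySem.List.le_foldl_max (m.map f) b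
  refine ⟨h.1, fun x hx => h.2 (f x) (List.mem_map_of_mem hx)⟩

theorem pvF_congr (m : List Int) (b : Int) (f g : Int → Int)
    (h : ∀ x ∈ m, f x = g x) : pvF m b f = pvF m b g := by
  unfold pvF
  exact PySem.List.foldl_congr_mem m _ _ b (fun acc x hx => by rw [h x hx])

theorem pvF_eq_of_mem_iff (m₁ m₂ : List Int) (b : Int) (f : Int → Int)
    (h : ∀ x, x ∈ m₁ ↔ x ∈ m₂) : pvF m₁ b f = pvF m₂ b f := by
  apply le_antisymm
  · refine pvF_le _ _ _ _ (fun x hx => ?_) (pvF_ub m₂ b f).1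
    exact (pvF_ub m₂ b f).2 x ((h x).mp hx)
  · refine pvF_le _ _ _ _ (fun x hx => ?_) (pvF_ub m₁ b f).1
    exact (pvF_ub m₁ b f).2 x ((h x).mpr hx)

-- a run of equal keys continuing the previous value
theorem bstep_run (n : ℕ) (hn : 1 ≤ n) (x b c : Int) :
    (List.replicate n x).foldl bstep (b, c, some x) = (max b (c + n), c + n, some x) := by
  induction n generalizing b c with
  | zero => omega
  | succ m ih =>
    rcases Nat.eq_or_lt_of_le hn with h1 | h1
    · simp [← h1, bstep]
    · have hm : 1 ≤ m := by omega
      rw [List.replicate_succ, List.foldl_cons]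
      have step1 : bstep (b, c, some x) x = (max b (c + 1), c + 1, some x) := by
        simp [bstep]
      rw [step1, ih hm]
      have h2 : ((m + 1 : ℕ) : Int) = (m : Int) + 1 := by push_cast; ring
      rw [h2]
      have h3 : c + 1 + (m : Int) = c + ((m : Int) + 1) := by ring
      rw [h3]
      have h4 : max (max b (c + 1)) (c + ((m : Int) + 1)) = max b (c + ((m : Int) + 1)) := by
        omega
      rw [h4]

-- a run of equal keys started fresh (previous value does not match)
theorem bstep_fresh (n : ℕ) (hn : 1 ≤ n) (x b c : Int) (pr : Option Int) (hpr : pr ≠ some x) :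
    (List.replicate n x).foldl bstep (b, c, pr) = (max b (n : Int), (n : Int), some x) := by
  obtain ⟨m, hm⟩ := Nat.exists_eq_add_of_le hn
  subst hm
  rw [Nat.add_comm 1 m]
  rw [List.replicate_succ, List.foldl_cons]
  have step1 : bstep (b, c, pr) x = (max b 1, 1, some x) := by
    simp [bstep, hpr]
  rw [step1]
  rcases Nat.eq_zero_or_pos m with h0 | h0
  · subst h0; simp
  · rw [bstep_run m h0 x (max b 1) 1]
    have h1 : max (max b 1) (1 + (m : Int)) = max b (1 + m) := by omega
    have h2 : ((m + 1 : ℕ) : Int) = 1 + (m : Int) := by push_cast; ring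
    rw [h1, h2]

-- replicate fold of pvF: every term contributes the same value
theorem pvF_replicate (n : ℕ) (hn : 1 ≤ n) (x b : Int) (f : Int → Int) :
    pvF (List.replicate n x) b f = max b (f x) := by
  induction n generalizing b with
  | zero => omega
  | succ m ih =>
    rcases Nat.eq_zero_or_pos m with h0 | h0
    · subst h0; simp [pvF]
    · rw [List.replicate_succ]
      have : pvF (x :: List.replicate m x) b f = pvF (List.replicate m x) (max b (f x)) f := by
        simp [pvF]
      rw [this, ih h0]
      omega

-- the main invariant: on a chain-sorted list whose elements all differ from prev,
-- B's loop computes the running max of the multiplicities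

-- first-run decomposition of a chain-sorted nonempty list
theorem run_tw (x : Int) (t : List Int) :
    List.takeWhile (fun y => y == x) (x :: t)
      = List.replicate (List.takeWhile (fun y => y == x) (x :: t)).length x := by
  apply List.eq_replicate_of_mem
  intro y hy
  simpa using List.mem_takeWhile_imp hy

theorem run_tw_len (x : Int) (t : List Int) :
    1 ≤ (List.takeWhile (fun y => y == x) (x :: t)).length := by
  rw [List.takeWhile_cons]
  simp

theorem dropWhile_head_false {α : Type} (p : α → Bool) :
    ∀ (l : List α) (h : α) (r : List α), List.dropWhile p l = h :: r → p h = false := by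
  intro l
  induction l with
  | nil => intro h r hd; simp at hd
  | cons a t ih =>
    intro h r hd
    by_cases hpa : p a = true
    · rw [List.dropWhile_cons_of_pos hpa] at hd
      exact ih h r hd
    · rw [List.dropWhile_cons_of_neg hpa] at hd
      cases hd
      simpa using hpa

theorem run_dw_gt (x : Int) (t : List Int) (hsort : (x :: t).Pairwise (· ≤ ·)) :
    ∀ k ∈ List.dropWhile (fun y => y == x) (x :: t), x < k := by
  intro k hk
  cases hdweq : List.dropWhile (fun y => y == x) (x :: t) with
  | nil => rw [hdweq] at hk; simp at hk
  | cons h r =>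
    have hh : ¬ h = x := by
      have := dropWhile_head_false (fun y => y == x) (x :: t) h r hdweq
      simpa using this
    have hhx : x ≤ h := by
      have hmem : h ∈ x :: t := (List.dropWhile_sublist _).mem (by rw [hdweq]; simp)
      rcases List.mem_cons.mp hmem with h' | h'
      · omega
      · exact (List.pairwise_cons.mp hsort).1 h h'
    have hxh : x < h := lt_of_le_of_ne hhx (fun he => hh he.symm)
    rw [hdweq] at hk
    rcases List.mem_cons.mp hk with h' | h'
    · omega
    · have hdsort : (h :: r).Pairwise (· ≤ ·) := by
        rw [← hdweq]
        exact hsort.sublist (List.dropWhile_sublist _)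
      have := (List.pairwise_cons.mp hdsort).1 k h'
      omega

theorem pvF_append (l1 l2 : List Int) (b : Int) (f : Int → Int) :
    pvF (l1 ++ l2) b f = pvF l2 (pvF l1 b f) f := by
  simp [pvF]

theorem bstep_main (N : ℕ) : ∀ (l : List Int), l.length ≤ N → l.Pairwise (· ≤ ·) →
    ∀ (b c : Int) (pr : Option Int), (∀ x ∈ l, pr ≠ some x) →
    (l.foldl bstep (b, c, pr)).1 = pvF l b (fun k => (l.count k : Int)) := by
  induction N with
  | zero =>
    intro l hl _ b c pr _
    have : l = [] := List.eq_nil_of_length_eq_zero (by omega)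
    subst this; simp [pvF]
  | succ M ih =>
    intro l hl hsort b c pr hpr
    cases hleq : l with
    | nil => simp [pvF]
    | cons x t =>
      subst hleq
      have hsplit : List.takeWhile (fun y => y == x) (x :: t)
          ++ List.dropWhile (fun y => y == x) (x :: t) = x :: t :=
        List.takeWhile_append_dropWhile
      have htwrep := run_tw x t
      have hn1 := run_tw_len x t
      have hdwgt := run_dw_gt x t hsort
      -- abbreviations
      obtain ⟨n, hn⟩ : ∃ n, (List.takeWhile (fun y => y == x) (x :: t)).length = n := ⟨_, rfl⟩
      rw [hn] at htwrep hn1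
      have hxnotdw : x ∉ List.dropWhile (fun y => y == x) (x :: t) :=
        fun hx => absurd (hdwgt x hx) (lt_irrefl x)
      -- count of x in the whole list is n
      have hcx : (x :: t).count x = n := by
        rw [← hsplit, List.count_append, htwrep, List.count_replicate_self,
          List.count_eq_zero.mpr hxnotdw]
        omega
      -- counts of dropWhile elements agree with the whole list
      have hcdw : ∀ k ∈ List.dropWhile (fun y => y == x) (x :: t),
          (x :: t).count k = (List.dropWhile (fun y => y == x) (x :: t)).count k := by
        intro k hk
        have hkx : ¬ k = x := by have := hdwgt k hk; omega
        conv_lhs => rw [← hsplit]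
        simp only [List.count_append, htwrep, List.count_replicate]
        split_ifs with h
        · simp at h; omega
        · omega
      have hdwsort : (List.dropWhile (fun y => y == x) (x :: t)).Pairwise (· ≤ ·) :=
        hsort.sublist (List.dropWhile_sublist _)
      have hdwlen : (List.dropWhile (fun y => y == x) (x :: t)).length ≤ M := by
        have := congrArg List.length hsplit
        simp only [List.length_append] at this
        simp only [List.length_cons] at this hl
        omega
      -- LHS: fold over the first run, then the rest
      have hLHS : ((x :: t).foldl bstep (b, c, pr)).1
          = pvF (List.dropWhile (fun y => y == x) (x :: t)) (max b n)
              (fun k => ((List.dropWhile (fun y => y == x) (x :: t)).count k : Int)) := by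
        conv_lhs => rw [← hsplit, htwrep]
        rw [List.foldl_append, bstep_fresh n hn1 x b c pr (hpr x (by simp))]
        exact ih _ hdwlen hdwsort (max b n) n (some x)
          (fun k hk => by simp [ne_of_lt (hdwgt k hk)])
      rw [hLHS]
      -- RHS: split pvF the same way
      have hRHS : pvF (x :: t) b (fun k => ((x :: t).count k : Int))
          = pvF (List.dropWhile (fun y => y == x) (x :: t)) (max b (n : Int))
              (fun k => ((List.dropWhile (fun y => y == x) (x :: t)).count k : Int)) := by
        obtain ⟨f, hf⟩ : ∃ f, (fun k => (((x :: t).count k : ℕ) : Int)) = f := ⟨_, rfl⟩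
        rw [hf]
        conv_lhs => rw [← hsplit]
        rw [pvF_append, htwrep, pvF_replicate n hn1 x b f, ← hf]
        have hx2 : (fun k => (((x :: t).count k : ℕ) : Int)) x = (n : Int) := by
          simp [hcx]
        rw [hx2]
        exact pvF_congr _ _ _ _ (fun k hk => by rw [hcdw k hk])
      rw [hRHS]

-- A's dict loop is Counter over the group keys; its values-max is pvF over the keys
theorem a_side (ks : List Int) (hne : ks ≠ []) :
    (match PySem.List.max?
        (ks.foldl (fun d x => d.insert x (d.getD x 0 + 1)) PySem.Dict.empty).values
        (fun v => v) with
      | some m => m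
      | none => 0)
      = pvF ks 0 (fun k => (ks.count k : Int)) := by
  rw [PySem.Dict.foldl_insert_getD_add_one_eq_counter]
  have hvals : (PySem.Dict.counter ks).values
      = (PySem.Set.ofList ks).map (fun k => (ks.count k : Int)) := by
    show (PySem.Dict.counter ks).items.map Prod.snd = _
    rw [PySem.Dict.items_counter, List.map_map]
    rfl
  rw [hvals]
  cases hof : PySem.Set.ofList ks with
  | nil =>
    exfalso
    rcases List.exists_mem_of_ne_nil ks hne with ⟨y, hy⟩
    have := (PySem.Set.mem_ofList ks y).mpr hy
    rw [hof] at this; simp at this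
  | cons y ys =>
    rw [List.map_cons, PySem.List.max?_id_cons]
    have h0 : max (0 : Int) ((ks.count y : Int)) = (ks.count y : Int) := by omega
    have : List.foldl max ((ks.count y : Int)) (ys.map (fun k => (ks.count k : Int)))
        = pvF (y :: ys) 0 (fun k => (ks.count k : Int)) := by
      rw [pvF_map, List.map_cons, List.foldl_cons, h0]
    rw [this, ← hof]
    exact pvF_eq_of_mem_iff _ _ _ _ (fun k => PySem.Set.mem_ofList ks k)

-- B side: fold over the sorted keys is pvF over the original keys
theorem b_side (ks : List Int) :
    ((PySem.List.sorted ks (fun x => x) false).foldl bstep ((0:Int), (0:Int), (none : Option Int))).1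
      = pvF ks 0 (fun k => (ks.count k : Int)) := by
  have hperm := PySem.List.sorted_perm ks (fun x => x) false
  have hsort : (PySem.List.sorted ks (fun x => x) false).Pairwise (· ≤ ·) :=
    PySem.List.sorted_pairwise ks (fun x => x)
  rw [bstep_main (PySem.List.sorted ks (fun x => x) false).length _ le_rfl hsort 0 0 none
    (by simp)]
  rw [pvF_congr _ _ _ (fun k => (ks.count k : Int))
    (fun k _ => by rw [hperm.count_eq k])]
  exact pvF_eq_of_mem_iff _ _ _ _ (fun k => hperm.mem_iff)

-- ===== VERDICT (by name: the statement is the Claim_ definition above) =====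
theorem get_item_links_py_spec : Claim_equal_get_item_links_py := by
  intro item _
  unfold Spec_get_item_links_py get_item_links_py get_item_links_py_alt
  simp only []
  by_cases hs : (PySem.Dict.mk item).getD "sockets" [] = []
  · simp [hs]
  · simp only [if_neg hs]
    have hfold : ((PySem.Dict.mk item).getD "sockets" []).foldl (fun d s =>
          let group := (PySem.Dict.mk s).getD "group" 0
          d.insert group (d.getD group 0 + 1)) (PySem.Dict.empty : PySem.Dict Int Int)
        = (((PySem.Dict.mk item).getD "sockets" []).map
            (fun s => (PySem.Dict.mk s).getD "group" 0)).foldl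
            (fun d x => d.insert x (d.getD x 0 + 1)) PySem.Dict.empty := by
      rw [List.foldl_map]
    rw [hfold]
    have hne : ((PySem.Dict.mk item).getD "sockets" []).map
        (fun s => (PySem.Dict.mk s).getD "group" 0) ≠ [] := by
      simpa using hs
    rw [a_side _ hne, b_side]
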